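-- pv_equiv track=rewrite | github.com/Migue1804/OKR-Checklist | app.py | is_positive
-- ===== SOURCE A (Python) =====
-- def is_positive(comentario):
--     # Palabras positivas
--     palabras_positivas = [
--         "bien", "excelente", "mejorar", "satisfactorio", "éxito", "logro", "bueno", "genial", "positivo", "afortunado",
--         "brillante", "exitoso", "increíble", "fantástico", "increíble", "maravilloso", "productivo", "aprobado", "triunfo",
--         "favorable", "perfecto", "eficiente", "avance", "progreso", "aplauso", "mejorado", "esperanzador", "innovador",
--         "crecimiento", "ganador", "beneficioso", "estupendo", "valioso", "acertado", "óptimo", "ventajoso", "construir",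
--         "positivamente", "útil", "correcto", "agradable", "bravo", "excelencia", "logrado", "fortaleza", "victorioso",
--         "prometedor", "felicidad", "prosperidad", "éxito", "bendecido", "triunfante", "confiable", "sobresaliente",
--         "agradecido", "genio", "sabio", "asombroso", "favorito", "prosperidad", "virtuoso", "estrella", "notable",
--         "exaltado", "saludable", "hábil", "sólido", "triunfante", "logrado", "gloria", "admirable", "admirado",
--         "extraordinario", "impresionante", "especial", "luminoso", "vibrante", "sabio", "espléndido", "fenomenal",
--         "alegre", "sofisticado", "excelencia", "grandioso", "brillante", "positividad", "afortunado", "deseable",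
--         "favorable", "optimista", "esperanzador", "valioso", "alegría", "éxito", "progreso", "risueño", "visionario",
--         "visionario", "esperanza", "logro", "exaltación", "vitalidad", "logro", "entusiasmo", "triunfo", "florecimiento",
--         "creativo", "estimulante", "motivador", "inspirador", "positivismo", "iluminado", "satisfacción", "gozo",
--         "excitación", "emocionante", "felicidad", "gratitud", "buenaventura", "victoria", "sonriente", "hermoso",
--         "alentador", "exitoso", "afortunado", "valiente", "firme", "sincero", "cálido", "digno", "notable", "estimado",
--         "optimista", "júbilo", "apasionado", "empoderado", "compasivo", "enriquecedor", "visionario", "poderoso",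
--         "transformador", "conmovedor", "trascendente", "radiante", "resplandeciente", "alentador", "inquebrantable",
--         "armonioso", "celestial", "triunfal", "intachable", "glorioso", "triunfante"
--     ]
--
--     # Palabras negativas
--     palabras_negativas = [
--         "problema", "deficiencia", "insatisfactorio", "error", "falla", "preocupación", "fracaso", "pobre", "desafío",
--         "crisis", "problema", "débil", "insuficiente", "inadecuado", "negativo", "inaceptable", "peligro", "lamentable",
--         "peligroso", "ineficaz", "inferior", "dañino", "decepción", "malo", "horrible", "insatisfactorio", "fracaso",
--         "ineficiente", "desafortunado", "conflicto", "defecto", "limitación", "fallo", "deficiente", "desastroso",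
--         "decepcionante", "incompetente", "debilidad", "dañado", "inapropiado", "negativo", "falta", "atroz", "injusto",
--         "incapaz", "miserable", "perjudicial", "trágico", "oscuro", "horroroso", "triste", "desesperado", "abrumador",
--         "amenaza", "desgracia", "atroz", "aterrador", "horrible", "pésimo", "atroz", "tristeza", "pena", "desesperación",
--         "inaceptable", "amargura", "impotente", "ruinoso", "aborrecible", "lamentable", "inútil", "desalentador",
--         "agonizante", "despiadado", "peligroso", "sin esperanza", "agonía", "lamentable", "doloroso", "tenebroso",
--         "enfermedad", "desolador", "devastador", "siniestro", "lúgubre", "malo", "amargo", "desgarrador", "penoso",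
--         "aterrador", "estremecedor", "lamentoso", "tormentoso", "caótico", "desalentador", "angustiante", "catastrófico",
--         "oscuro", "traumático", "desastroso", "débil", "perdido", "inútil", "sombrio", "insoportable", "fatal", "miseria",
--         "agonía", "lamentable", "pavoroso", "lamentoso", "tormentoso", "angustiante", "inquietante", "inseguro",
--         "amargado", "desolado", "infeliz", "temible", "repulsivo", "atroz", "traumático", "lamentoso", "patético",
--         "siniestro", "oscuro", "turbulento", "desesperanzador", "pésimo", "desgarrador", "pesadilla", "inquietante",
--         "deprimente", "funesto", "miserable", "inestable", "desalentador", "sombrío", "agonizante", "despiadado",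
--         "trágico", "atroz", "abominable", "maldito", "ruinoso", "insoportable", "desgarrador", "agonizante", "penoso",
--         "lamentable", "insoportable", "sin salida", "impotente", "indeseable", "deshonesto", "inaceptable"
--     ]
--
--
--     for palabra in palabras_positivas:
--         if palabra in comentario.lower():
--             return True
--
--     for palabra in palabras_negativas:
--         if palabra in comentario.lower():
--             return False
--
--     return False
-- ===== SOURCE B (Python) =====
-- _TUPLA_POSITIVAS = (
--     'bien', 'excelente', 'mejorar', 'satisfactorio', 'éxito', 'logro', 'bueno', 'genial', 'positivo',
--     'afortunado', 'brillante', 'exitoso', 'increíble', 'fantástico', 'increíble', 'maravilloso',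
--     'productivo', 'aprobado', 'triunfo', 'favorable', 'perfecto', 'eficiente', 'avance', 'progreso',
--     'aplauso', 'mejorado', 'esperanzador', 'innovador', 'crecimiento', 'ganador', 'beneficioso',
--     'estupendo', 'valioso', 'acertado', 'óptimo', 'ventajoso', 'construir', 'positivamente', 'útil',
--     'correcto', 'agradable', 'bravo', 'excelencia', 'logrado', 'fortaleza', 'victorioso', 'prometedor',
--     'felicidad', 'prosperidad', 'éxito', 'bendecido', 'triunfante', 'confiable', 'sobresaliente',
--     'agradecido', 'genio', 'sabio', 'asombroso', 'favorito', 'prosperidad', 'virtuoso', 'estrella',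
--     'notable', 'exaltado', 'saludable', 'hábil', 'sólido', 'triunfante', 'logrado', 'gloria',
--     'admirable', 'admirado', 'extraordinario', 'impresionante', 'especial', 'luminoso', 'vibrante',
--     'sabio', 'espléndido', 'fenomenal', 'alegre', 'sofisticado', 'excelencia', 'grandioso', 'brillante',
--     'positividad', 'afortunado', 'deseable', 'favorable', 'optimista', 'esperanzador', 'valioso',
--     'alegría', 'éxito', 'progreso', 'risueño', 'visionario', 'visionario', 'esperanza', 'logro',
--     'exaltación', 'vitalidad', 'logro', 'entusiasmo', 'triunfo', 'florecimiento', 'creativo',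
--     'estimulante', 'motivador', 'inspirador', 'positivismo', 'iluminado', 'satisfacción', 'gozo',
--     'excitación', 'emocionante', 'felicidad', 'gratitud', 'buenaventura', 'victoria', 'sonriente',
--     'hermoso', 'alentador', 'exitoso', 'afortunado', 'valiente', 'firme', 'sincero', 'cálido', 'digno',
--     'notable', 'estimado', 'optimista', 'júbilo', 'apasionado', 'empoderado', 'compasivo',
--     'enriquecedor', 'visionario', 'poderoso', 'transformador', 'conmovedor', 'trascendente', 'radiante',
--     'resplandeciente', 'alentador', 'inquebrantable', 'armonioso', 'celestial', 'triunfal',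
--     'intachable', 'glorioso', 'triunfante'
-- )
--
-- def is_positive(comentario):
--     # Position-major scan: lowercase once, then for each start index check
--     # whether some positive word begins there (A's negative-word loop is dead code:
--     # it returns False in either branch, just like the final return).
--     texto = comentario.lower()
--     return any(texto.startswith(_TUPLA_POSITIVAS, i)
--                for i in range(len(texto) + 1))
-- ===== Notes on version B (the rewrite author's own statement) =====
-- stated objective: alternative
-- what changed: B lowercases the comment once and does a position-major scan (for each start index, does some positive word begin here?) instead of A's word-major substring loops that re-lowercase the comment per word, and drops A's dead negative-word pass whose result is False either way.
import Mathlib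
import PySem

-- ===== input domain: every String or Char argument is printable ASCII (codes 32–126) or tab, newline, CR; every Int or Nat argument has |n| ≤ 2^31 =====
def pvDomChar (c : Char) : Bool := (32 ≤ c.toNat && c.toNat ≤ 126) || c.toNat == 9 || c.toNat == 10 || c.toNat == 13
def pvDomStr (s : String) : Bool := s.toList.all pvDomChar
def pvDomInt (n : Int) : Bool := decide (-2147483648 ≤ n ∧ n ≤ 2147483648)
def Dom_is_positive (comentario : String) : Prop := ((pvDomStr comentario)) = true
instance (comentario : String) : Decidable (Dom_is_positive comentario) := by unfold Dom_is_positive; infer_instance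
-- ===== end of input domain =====

-- B replaces A's word-major substring loops (and its dead negative-word pass) by one
-- lowercase pass followed by a position-major character scan of the comment against a
-- char-level word table; same return value on every input.

-- ===== PORT A =====
def palabrasPositivas : List String := [
"bien", "excelente", "mejorar", "satisfactorio", "éxito", "logro", "bueno", "genial", "positivo",
"afortunado", "brillante", "exitoso", "increíble", "fantástico", "increíble", "maravilloso", "productivo",
"aprobado", "triunfo", "favorable", "perfecto", "eficiente", "avance", "progreso", "aplauso", "mejorado",
"esperanzador", "innovador", "crecimiento", "ganador", "beneficioso", "estupendo", "valioso", "acertado",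
"óptimo", "ventajoso", "construir", "positivamente", "útil", "correcto", "agradable", "bravo", "excelencia",
"logrado", "fortaleza", "victorioso", "prometedor", "felicidad", "prosperidad", "éxito", "bendecido",
"triunfante", "confiable", "sobresaliente", "agradecido", "genio", "sabio", "asombroso", "favorito",
"prosperidad", "virtuoso", "estrella", "notable", "exaltado", "saludable", "hábil", "sólido", "triunfante",
"logrado", "gloria", "admirable", "admirado", "extraordinario", "impresionante", "especial", "luminoso",
"vibrante", "sabio", "espléndido", "fenomenal", "alegre", "sofisticado", "excelencia", "grandioso",
"brillante", "positividad", "afortunado", "deseable", "favorable", "optimista", "esperanzador", "valioso",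
"alegría", "éxito", "progreso", "risueño", "visionario", "visionario", "esperanza", "logro", "exaltación",
"vitalidad", "logro", "entusiasmo", "triunfo", "florecimiento", "creativo", "estimulante", "motivador",
"inspirador", "positivismo", "iluminado", "satisfacción", "gozo", "excitación", "emocionante", "felicidad",
"gratitud", "buenaventura", "victoria", "sonriente", "hermoso", "alentador", "exitoso", "afortunado",
"valiente", "firme", "sincero", "cálido", "digno", "notable", "estimado", "optimista", "júbilo", "apasionado",
"empoderado", "compasivo", "enriquecedor", "visionario", "poderoso", "transformador", "conmovedor",
"trascendente", "radiante", "resplandeciente", "alentador", "inquebrantable", "armonioso", "celestial",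
"triunfal", "intachable", "glorioso", "triunfante"]

def palabrasNegativas : List String := [
"problema", "deficiencia", "insatisfactorio", "error", "falla", "preocupación", "fracaso", "pobre", "desafío",
"crisis", "problema", "débil", "insuficiente", "inadecuado", "negativo", "inaceptable", "peligro",
"lamentable", "peligroso", "ineficaz", "inferior", "dañino", "decepción", "malo", "horrible",
"insatisfactorio", "fracaso", "ineficiente", "desafortunado", "conflicto", "defecto", "limitación", "fallo",
"deficiente", "desastroso", "decepcionante", "incompetente", "debilidad", "dañado", "inapropiado", "negativo",
"falta", "atroz", "injusto", "incapaz", "miserable", "perjudicial", "trágico", "oscuro", "horroroso",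
"triste", "desesperado", "abrumador", "amenaza", "desgracia", "atroz", "aterrador", "horrible", "pésimo",
"atroz", "tristeza", "pena", "desesperación", "inaceptable", "amargura", "impotente", "ruinoso",
"aborrecible", "lamentable", "inútil", "desalentador", "agonizante", "despiadado", "peligroso", "sin
esperanza", "agonía", "lamentable", "doloroso", "tenebroso", "enfermedad", "desolador", "devastador",
"siniestro", "lúgubre", "malo", "amargo", "desgarrador", "penoso", "aterrador", "estremecedor", "lamentoso",
"tormentoso", "caótico", "desalentador", "angustiante", "catastrófico", "oscuro", "traumático", "desastroso",
"débil", "perdido", "inútil", "sombrio", "insoportable", "fatal", "miseria", "agonía", "lamentable",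
"pavoroso", "lamentoso", "tormentoso", "angustiante", "inquietante", "inseguro", "amargado", "desolado",
"infeliz", "temible", "repulsivo", "atroz", "traumático", "lamentoso", "patético", "siniestro", "oscuro",
"turbulento", "desesperanzador", "pésimo", "desgarrador", "pesadilla", "inquietante", "deprimente", "funesto",
"miserable", "inestable", "desalentador", "sombrío", "agonizante", "despiadado", "trágico", "atroz",
"abominable", "maldito", "ruinoso", "insoportable", "desgarrador", "agonizante", "penoso", "lamentable",
"insoportable", "sin salida", "impotente", "indeseable", "deshonesto", "inaceptable"]

-- 'for palabra in palabras_positivas: if palabra in comentario.lower(): return True' then the negative loop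
def aLoopNeg (ws : List String) (comentario : String) : Bool :=
  match ws with
  | [] => false
  | w :: rest => if PySem.Str.isIn w (PySem.Str.lower comentario) then false else aLoopNeg rest comentario

def aLoopPos (ws : List String) (comentario : String) : Bool :=
  match ws with
  | [] => aLoopNeg palabrasNegativas comentario
  | w :: rest => if PySem.Str.isIn w (PySem.Str.lower comentario) then true else aLoopPos rest comentario

def is_positive (comentario : String) : Bool :=
  aLoopPos palabrasPositivas comentario

-- ===== PORT B =====
-- B's word table, kept at the character level (the port of B scans code points one by one)
def tablaPositivas : List (List Char) := [
['b', 'i', 'e', 'n'], ['e', 'x', 'c', 'e', 'l', 'e', 'n', 't', 'e'], ['m', 'e', 'j', 'o', 'r', 'a', 'r'],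
['s', 'a', 't', 'i', 's', 'f', 'a', 'c', 't', 'o', 'r', 'i', 'o'], ['é', 'x', 'i', 't', 'o'], ['l', 'o', 'g',
'r', 'o'], ['b', 'u', 'e', 'n', 'o'], ['g', 'e', 'n', 'i', 'a', 'l'], ['p', 'o', 's', 'i', 't', 'i', 'v',
'o'], ['a', 'f', 'o', 'r', 't', 'u', 'n', 'a', 'd', 'o'], ['b', 'r', 'i', 'l', 'l', 'a', 'n', 't', 'e'], ['e',
'x', 'i', 't', 'o', 's', 'o'], ['i', 'n', 'c', 'r', 'e', 'í', 'b', 'l', 'e'], ['f', 'a', 'n', 't', 'á', 's',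
't', 'i', 'c', 'o'], ['i', 'n', 'c', 'r', 'e', 'í', 'b', 'l', 'e'], ['m', 'a', 'r', 'a', 'v', 'i', 'l', 'l',
'o', 's', 'o'], ['p', 'r', 'o', 'd', 'u', 'c', 't', 'i', 'v', 'o'], ['a', 'p', 'r', 'o', 'b', 'a', 'd', 'o'],
['t', 'r', 'i', 'u', 'n', 'f', 'o'], ['f', 'a', 'v', 'o', 'r', 'a', 'b', 'l', 'e'], ['p', 'e', 'r', 'f', 'e',
'c', 't', 'o'], ['e', 'f', 'i', 'c', 'i', 'e', 'n', 't', 'e'], ['a', 'v', 'a', 'n', 'c', 'e'], ['p', 'r', 'o',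
'g', 'r', 'e', 's', 'o'], ['a', 'p', 'l', 'a', 'u', 's', 'o'], ['m', 'e', 'j', 'o', 'r', 'a', 'd', 'o'], ['e',
's', 'p', 'e', 'r', 'a', 'n', 'z', 'a', 'd', 'o', 'r'], ['i', 'n', 'n', 'o', 'v', 'a', 'd', 'o', 'r'], ['c',
'r', 'e', 'c', 'i', 'm', 'i', 'e', 'n', 't', 'o'], ['g', 'a', 'n', 'a', 'd', 'o', 'r'], ['b', 'e', 'n', 'e',
'f', 'i', 'c', 'i', 'o', 's', 'o'], ['e', 's', 't', 'u', 'p', 'e', 'n', 'd', 'o'], ['v', 'a', 'l', 'i', 'o',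
's', 'o'], ['a', 'c', 'e', 'r', 't', 'a', 'd', 'o'], ['ó', 'p', 't', 'i', 'm', 'o'], ['v', 'e', 'n', 't', 'a',
'j', 'o', 's', 'o'], ['c', 'o', 'n', 's', 't', 'r', 'u', 'i', 'r'], ['p', 'o', 's', 'i', 't', 'i', 'v', 'a',
'm', 'e', 'n', 't', 'e'], ['ú', 't', 'i', 'l'], ['c', 'o', 'r', 'r', 'e', 'c', 't', 'o'], ['a', 'g', 'r', 'a',
'd', 'a', 'b', 'l', 'e'], ['b', 'r', 'a', 'v', 'o'], ['e', 'x', 'c', 'e', 'l', 'e', 'n', 'c', 'i', 'a'], ['l',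
'o', 'g', 'r', 'a', 'd', 'o'], ['f', 'o', 'r', 't', 'a', 'l', 'e', 'z', 'a'], ['v', 'i', 'c', 't', 'o', 'r',
'i', 'o', 's', 'o'], ['p', 'r', 'o', 'm', 'e', 't', 'e', 'd', 'o', 'r'], ['f', 'e', 'l', 'i', 'c', 'i', 'd',
'a', 'd'], ['p', 'r', 'o', 's', 'p', 'e', 'r', 'i', 'd', 'a', 'd'], ['é', 'x', 'i', 't', 'o'], ['b', 'e', 'n',
'd', 'e', 'c', 'i', 'd', 'o'], ['t', 'r', 'i', 'u', 'n', 'f', 'a', 'n', 't', 'e'], ['c', 'o', 'n', 'f', 'i',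
'a', 'b', 'l', 'e'], ['s', 'o', 'b', 'r', 'e', 's', 'a', 'l', 'i', 'e', 'n', 't', 'e'], ['a', 'g', 'r', 'a',
'd', 'e', 'c', 'i', 'd', 'o'], ['g', 'e', 'n', 'i', 'o'], ['s', 'a', 'b', 'i', 'o'], ['a', 's', 'o', 'm', 'b',
'r', 'o', 's', 'o'], ['f', 'a', 'v', 'o', 'r', 'i', 't', 'o'], ['p', 'r', 'o', 's', 'p', 'e', 'r', 'i', 'd',
'a', 'd'], ['v', 'i', 'r', 't', 'u', 'o', 's', 'o'], ['e', 's', 't', 'r', 'e', 'l', 'l', 'a'], ['n', 'o', 't',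
'a', 'b', 'l', 'e'], ['e', 'x', 'a', 'l', 't', 'a', 'd', 'o'], ['s', 'a', 'l', 'u', 'd', 'a', 'b', 'l', 'e'],
['h', 'á', 'b', 'i', 'l'], ['s', 'ó', 'l', 'i', 'd', 'o'], ['t', 'r', 'i', 'u', 'n', 'f', 'a', 'n', 't', 'e'],
['l', 'o', 'g', 'r', 'a', 'd', 'o'], ['g', 'l', 'o', 'r', 'i', 'a'], ['a', 'd', 'm', 'i', 'r', 'a', 'b', 'l',
'e'], ['a', 'd', 'm', 'i', 'r', 'a', 'd', 'o'], ['e', 'x', 't', 'r', 'a', 'o', 'r', 'd', 'i', 'n', 'a', 'r',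
'i', 'o'], ['i', 'm', 'p', 'r', 'e', 's', 'i', 'o', 'n', 'a', 'n', 't', 'e'], ['e', 's', 'p', 'e', 'c', 'i',
'a', 'l'], ['l', 'u', 'm', 'i', 'n', 'o', 's', 'o'], ['v', 'i', 'b', 'r', 'a', 'n', 't', 'e'], ['s', 'a', 'b',
'i', 'o'], ['e', 's', 'p', 'l', 'é', 'n', 'd', 'i', 'd', 'o'], ['f', 'e', 'n', 'o', 'm', 'e', 'n', 'a', 'l'],
['a', 'l', 'e', 'g', 'r', 'e'], ['s', 'o', 'f', 'i', 's', 't', 'i', 'c', 'a', 'd', 'o'], ['e', 'x', 'c', 'e',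
'l', 'e', 'n', 'c', 'i', 'a'], ['g', 'r', 'a', 'n', 'd', 'i', 'o', 's', 'o'], ['b', 'r', 'i', 'l', 'l', 'a',
'n', 't', 'e'], ['p', 'o', 's', 'i', 't', 'i', 'v', 'i', 'd', 'a', 'd'], ['a', 'f', 'o', 'r', 't', 'u', 'n',
'a', 'd', 'o'], ['d', 'e', 's', 'e', 'a', 'b', 'l', 'e'], ['f', 'a', 'v', 'o', 'r', 'a', 'b', 'l', 'e'], ['o',
'p', 't', 'i', 'm', 'i', 's', 't', 'a'], ['e', 's', 'p', 'e', 'r', 'a', 'n', 'z', 'a', 'd', 'o', 'r'], ['v',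
'a', 'l', 'i', 'o', 's', 'o'], ['a', 'l', 'e', 'g', 'r', 'í', 'a'], ['é', 'x', 'i', 't', 'o'], ['p', 'r', 'o',
'g', 'r', 'e', 's', 'o'], ['r', 'i', 's', 'u', 'e', 'ñ', 'o'], ['v', 'i', 's', 'i', 'o', 'n', 'a', 'r', 'i',
'o'], ['v', 'i', 's', 'i', 'o', 'n', 'a', 'r', 'i', 'o'], ['e', 's', 'p', 'e', 'r', 'a', 'n', 'z', 'a'], ['l',
'o', 'g', 'r', 'o'], ['e', 'x', 'a', 'l', 't', 'a', 'c', 'i', 'ó', 'n'], ['v', 'i', 't', 'a', 'l', 'i', 'd',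
'a', 'd'], ['l', 'o', 'g', 'r', 'o'], ['e', 'n', 't', 'u', 's', 'i', 'a', 's', 'm', 'o'], ['t', 'r', 'i', 'u',
'n', 'f', 'o'], ['f', 'l', 'o', 'r', 'e', 'c', 'i', 'm', 'i', 'e', 'n', 't', 'o'], ['c', 'r', 'e', 'a', 't',
'i', 'v', 'o'], ['e', 's', 't', 'i', 'm', 'u', 'l', 'a', 'n', 't', 'e'], ['m', 'o', 't', 'i', 'v', 'a', 'd',
'o', 'r'], ['i', 'n', 's', 'p', 'i', 'r', 'a', 'd', 'o', 'r'], ['p', 'o', 's', 'i', 't', 'i', 'v', 'i', 's',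
'm', 'o'], ['i', 'l', 'u', 'm', 'i', 'n', 'a', 'd', 'o'], ['s', 'a', 't', 'i', 's', 'f', 'a', 'c', 'c', 'i',
'ó', 'n'], ['g', 'o', 'z', 'o'], ['e', 'x', 'c', 'i', 't', 'a', 'c', 'i', 'ó', 'n'], ['e', 'm', 'o', 'c', 'i',
'o', 'n', 'a', 'n', 't', 'e'], ['f', 'e', 'l', 'i', 'c', 'i', 'd', 'a', 'd'], ['g', 'r', 'a', 't', 'i', 't',
'u', 'd'], ['b', 'u', 'e', 'n', 'a', 'v', 'e', 'n', 't', 'u', 'r', 'a'], ['v', 'i', 'c', 't', 'o', 'r', 'i',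
'a'], ['s', 'o', 'n', 'r', 'i', 'e', 'n', 't', 'e'], ['h', 'e', 'r', 'm', 'o', 's', 'o'], ['a', 'l', 'e', 'n',
't', 'a', 'd', 'o', 'r'], ['e', 'x', 'i', 't', 'o', 's', 'o'], ['a', 'f', 'o', 'r', 't', 'u', 'n', 'a', 'd',
'o'], ['v', 'a', 'l', 'i', 'e', 'n', 't', 'e'], ['f', 'i', 'r', 'm', 'e'], ['s', 'i', 'n', 'c', 'e', 'r',
'o'], ['c', 'á', 'l', 'i', 'd', 'o'], ['d', 'i', 'g', 'n', 'o'], ['n', 'o', 't', 'a', 'b', 'l', 'e'], ['e',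
's', 't', 'i', 'm', 'a', 'd', 'o'], ['o', 'p', 't', 'i', 'm', 'i', 's', 't', 'a'], ['j', 'ú', 'b', 'i', 'l',
'o'], ['a', 'p', 'a', 's', 'i', 'o', 'n', 'a', 'd', 'o'], ['e', 'm', 'p', 'o', 'd', 'e', 'r', 'a', 'd', 'o'],
['c', 'o', 'm', 'p', 'a', 's', 'i', 'v', 'o'], ['e', 'n', 'r', 'i', 'q', 'u', 'e', 'c', 'e', 'd', 'o', 'r'],
['v', 'i', 's', 'i', 'o', 'n', 'a', 'r', 'i', 'o'], ['p', 'o', 'd', 'e', 'r', 'o', 's', 'o'], ['t', 'r', 'a',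
'n', 's', 'f', 'o', 'r', 'm', 'a', 'd', 'o', 'r'], ['c', 'o', 'n', 'm', 'o', 'v', 'e', 'd', 'o', 'r'], ['t',
'r', 'a', 's', 'c', 'e', 'n', 'd', 'e', 'n', 't', 'e'], ['r', 'a', 'd', 'i', 'a', 'n', 't', 'e'], ['r', 'e',
's', 'p', 'l', 'a', 'n', 'd', 'e', 'c', 'i', 'e', 'n', 't', 'e'], ['a', 'l', 'e', 'n', 't', 'a', 'd', 'o',
'r'], ['i', 'n', 'q', 'u', 'e', 'b', 'r', 'a', 'n', 't', 'a', 'b', 'l', 'e'], ['a', 'r', 'm', 'o', 'n', 'i',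
'o', 's', 'o'], ['c', 'e', 'l', 'e', 's', 't', 'i', 'a', 'l'], ['t', 'r', 'i', 'u', 'n', 'f', 'a', 'l'], ['i',
'n', 't', 'a', 'c', 'h', 'a', 'b', 'l', 'e'], ['g', 'l', 'o', 'r', 'i', 'o', 's', 'o'], ['t', 'r', 'i', 'u',
'n', 'f', 'a', 'n', 't', 'e']]

-- texto.startswith(tuple_of_words, i): does some table word begin at position i?
def empiezaAqui (resto : List Char) : Bool :=
  tablaPositivas.any (fun p => PySem.Chars.startswith resto p)

-- position-major scan over i = 0 .. len(texto) (range(len(texto)+1) in Source B)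
def is_positive_alt (comentario : String) : Bool :=
  let texto := (PySem.Str.lower comentario).toList
  (List.range (texto.length + 1)).any (fun i => empiezaAqui (texto.drop i))

-- ===== PRECONDITION & SPEC =====
def Spec_is_positive (comentario : String) (out : Bool) : Prop := out = is_positive_alt comentario
instance (comentario : String) (out : Bool) : Decidable (Spec_is_positive comentario out) := by unfold Spec_is_positive; infer_instance

-- ===== CLAIM (what is proved, stated in full; the proofs are below) =====
def Claim_equal_is_positive : Prop := ∀ (comentario : String), Dom_is_positive comentario → Spec_is_positive comentario (is_positive comentario)

-- ===== LEMMAS AND PROOFS =====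

-- A's word list and B's char-level table carry the same words (checked by the kernel's
-- string-literal/ofList conversion; no character-level computation is stated)
set_option maxRecDepth 2000000 in
theorem palabras_eq : palabrasPositivas = tablaPositivas.map String.ofList := rfl

theorem aLoopNeg_eq_false (ws : List String) (c : String) : aLoopNeg ws c = false := by
  induction ws with
  | nil => rfl
  | cons w rest ih => simp [aLoopNeg, ih]

theorem aLoopPos_eq_any (ws : List String) (c : String) :
    aLoopPos ws c = ws.any (fun w => PySem.Str.isIn w (PySem.Str.lower c)) := by
  induction ws with
  | nil => simp [aLoopPos, aLoopNeg_eq_false]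
  | cons w rest ih => simp [aLoopPos, ih]

theorem isIn_iff_exists_start (sub s : List Char) :
    PySem.Chars.isIn sub s = true ↔
      ∃ i < s.length + 1, PySem.Chars.startswith (s.drop i) sub = true := by
  rw [← PySem.Chars.exists_prefix_drop_iff_isIn]
  constructor
  · rintro ⟨j, hj⟩
    by_cases h : j ≤ s.length
    · exact ⟨j, by omega, (PySem.Chars.startswith_iff _ _).2 hj⟩
    · have hd : s.drop j = [] := List.drop_eq_nil_of_le (by omega)
      rw [hd] at hj
      have : sub = [] := List.prefix_nil.mp hj
      exact ⟨0, by omega, (PySem.Chars.startswith_iff _ _).2 (by simp [this])⟩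
  · rintro ⟨i, _, h⟩
    exact ⟨i, (PySem.Chars.startswith_iff _ _).1 h⟩

-- ===== VERDICT (by name: the statement is the Claim_ definition above) =====
theorem is_positive_spec : Claim_equal_is_positive := by
  intro c _
  unfold Spec_is_positive is_positive is_positive_alt empiezaAqui
  rw [aLoopPos_eq_any, palabras_eq]
  refine Bool.eq_iff_iff.mpr ?_
  simp only [List.any_map, List.any_eq_true, List.mem_range, PySem.Str.isIn_eq,
    Function.comp, String.toList_ofList, isIn_iff_exists_start]
  constructor
  · rintro ⟨w, hw, i, hi, h⟩; exact ⟨i, hi, w, hw, h⟩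
  · rintro ⟨i, hi, w, hw, h⟩; exact ⟨w, hw, i, hi, h⟩
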